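-- pv_equiv track=rewrite | github.com/tomkennedy22/2021-Advent | day-03/solution-3.2.py | find_least_common
-- ===== SOURCE A (Python) =====
-- from collections import Counter
-- from itertools import groupby
--
-- def find_least_common(bit_list):
--     n = len(bit_list)
--     frequencies = groupby(Counter(bit_list).most_common()[: -n - 1: -1], lambda x:x[1])
--     least_common = [val for val,count in next(frequencies)[1]]
--     if len(least_common) > 1:
--         least_common = 0
--     else:
--         least_common = least_common[0]
--     return int(least_common)
-- ===== SOURCE B (Python) =====
-- from collections import Counter
--
-- def find_least_common(bit_list):
--     counts = Counter(bit_list)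
--     m = min(counts.values())
--     tied = [v for v, c in counts.items() if c == m]
--     return 0 if len(tied) > 1 else int(tied[0])
-- ===== Notes on version B (the rewrite author's own statement) =====
-- stated objective: simpler
-- what changed: replaced the sort + reversing slice + groupby pipeline over Counter.most_common() with a direct min over the counts and a filter of the values tied at that minimum
import Mathlib
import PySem

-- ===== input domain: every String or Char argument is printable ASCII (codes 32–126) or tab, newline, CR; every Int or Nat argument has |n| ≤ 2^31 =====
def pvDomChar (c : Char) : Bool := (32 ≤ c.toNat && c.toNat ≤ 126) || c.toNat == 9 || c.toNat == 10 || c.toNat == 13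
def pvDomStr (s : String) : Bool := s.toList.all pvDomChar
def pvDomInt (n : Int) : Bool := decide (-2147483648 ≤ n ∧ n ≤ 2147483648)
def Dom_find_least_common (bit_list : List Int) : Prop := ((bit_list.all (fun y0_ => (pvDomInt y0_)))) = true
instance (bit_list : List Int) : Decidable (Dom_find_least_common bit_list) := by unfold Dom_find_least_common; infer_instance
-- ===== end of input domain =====

-- B replaces A's sort+reversing-slice+groupby pipeline by a direct min over the counts
-- and a filter of the values tied at that minimum; equal on every nonempty list.

-- ===== PORT A =====
def find_least_common (bit_list : List Int) : Int :=
  let n := bit_list.length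
  let mc := PySem.List.sorted (PySem.Dict.counter bit_list).items (fun p => p.2) true
  -- Counter.most_common() = sorted(items, key=count, reverse=True) (stable); the slice
  -- mc[:-n-1:-1] (step -1, ported by hand) is the full reversal, exact on every input
  -- because mc has at most n elements.
  let rev := mc.reverse
  match rev with
  | [] => 0   -- Python: next(frequencies) raises StopIteration; excluded by Pre_
  | p :: _ =>
    -- first group of groupby(rev, key = count): elements while count equals the head's
    let least := (rev.takeWhile (fun q => q.2 == p.2)).map (fun q => q.1)
    if 1 < least.length then 0 else least.headD 0  -- least ≠ [] here, so headD is exact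

-- ===== PORT B =====
def find_least_common_alt (bit_list : List Int) : Int :=
  let counts := PySem.Dict.counter bit_list
  match PySem.List.min? counts.values (fun x => x) with
  | none => 0   -- Python: min() raises ValueError; excluded by Pre_
  | some m =>
    let tied := (counts.items.filter (fun p => p.2 == m)).map (fun p => p.1)
    if 1 < tied.length then 0 else tied.headD 0  -- tied ≠ [] here, so headD is exact

-- ===== PRECONDITION & SPEC =====
-- Pre_ excludes only the empty list, on which A raises StopIteration (and B ValueError).
def Pre_find_least_common (bit_list : List Int) : Prop := bit_list ≠ []
instance (bit_list : List Int) : Decidable (Pre_find_least_common bit_list) := by unfold Pre_find_least_common; infer_instance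
def pvWitness_find_least_common : List Int := [1, 0, 1]
def Spec_find_least_common (bit_list : List Int) (out : Int) : Prop := out = find_least_common_alt bit_list
instance (bit_list : List Int) (out : Int) : Decidable (Spec_find_least_common bit_list out) := by unfold Spec_find_least_common; infer_instance

-- ===== CLAIM (what is proved, stated in full; the proofs are below) =====
def Claim_equal_find_least_common : Prop := ∀ (bit_list : List Int), Dom_find_least_common bit_list → Pre_find_least_common bit_list → Spec_find_least_common bit_list (find_least_common bit_list)

-- ===== LEMMAS AND PROOFS =====

-- On a list nondecreasing in .2 whose elements all have m ≤ .2, taking while .2 = m is filtering .2 = m.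
theorem takeWhile_eq_filter_min (m : Int) :
    ∀ (s : List (Int × Int)), s.Pairwise (fun a b => a.2 ≤ b.2) → (∀ q ∈ s, m ≤ q.2) →
      s.takeWhile (fun q => q.2 == m) = s.filter (fun q => q.2 == m) := by
  intro s
  induction s with
  | nil => intro _ _; rfl
  | cons q t ih =>
    intro hp hge
    rcases List.pairwise_cons.mp hp with ⟨hq, ht⟩
    by_cases hqm : q.2 = m
    · simp [List.takeWhile_cons, List.filter_cons, hqm,
        ih ht (fun r hr => hge r (List.mem_cons_of_mem q hr))]
    · have hlt : m < q.2 := lt_of_le_of_ne (hge q (List.mem_cons_self)) (Ne.symm hqm)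
      have hfil : t.filter (fun r => r.2 == m) = [] := by
        apply List.filter_eq_nil_iff.mpr
        intro r hr
        have : m < r.2 := lt_of_lt_of_le hlt (hq r hr)
        simp; omega
      simp [List.takeWhile_cons, List.filter_cons, hqm, hfil]

-- The core: on any nonempty item list, A's reversed-sort-and-group computation equals
-- B's min-and-filter computation.
theorem core_eq (l : List (Int × Int)) (hl : l ≠ []) :
    (match (PySem.List.sorted l (fun p => p.2) true).reverse with
      | [] => (0 : Int)
      | p :: _ =>
        let least := (((PySem.List.sorted l (fun p => p.2) true).reverse.takeWhile (fun q : Int × Int => q.2 == p.2)).map (fun q : Int × Int => q.1))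
        if 1 < least.length then 0 else least.headD 0) =
    (match PySem.List.min? (l.map (fun p => p.2)) (fun x => x) with
      | none => (0 : Int)
      | some m =>
        let tied := (l.filter (fun p : Int × Int => p.2 == m)).map (fun p : Int × Int => p.1)
        if 1 < tied.length then 0 else tied.headD 0) := by
  cases hs : (PySem.List.sorted l (fun p => p.2) true).reverse with
  | nil =>
    exact absurd ((PySem.List.sorted_eq_nil_iff _ _ _).mp (List.reverse_eq_nil_iff.mp hs)) hl
  | cons p rest =>
    have hperm : (p :: rest).Perm l := by
      rw [← hs]
      exact (List.reverse_perm _).trans (PySem.List.sorted_perm l (fun p => p.2) true)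
    have hpair : (p :: rest).Pairwise (fun a b : Int × Int => a.2 ≤ b.2) := by
      rw [← hs]
      exact List.pairwise_reverse.mpr (PySem.List.sorted_pairwise_rev l (fun p => p.2))
    cases hm : PySem.List.min? (l.map (fun p : Int × Int => p.2)) (fun x => x) with
    | none =>
      exfalso
      have := (PySem.List.min?_eq_none_iff _ _).mp hm
      exact hl (List.map_eq_nil_iff.mp this)
    | some m =>
      have hmmem : m ∈ l.map (fun p : Int × Int => p.2) := PySem.List.min?_mem hm
      have hmin : ∀ y ∈ l.map (fun p : Int × Int => p.2), m ≤ y := by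
        intro y hy; exact PySem.List.min?_isMin hm y hy
      -- the head of the reversed sorted list carries the minimum count
      have hple : ∀ q ∈ p :: rest, p.2 ≤ q.2 := by
        intro q hq
        rcases List.mem_cons.mp hq with h | h
        · rw [h]
        · exact List.rel_of_pairwise_cons hpair h
      have hpm : p.2 = m := by
        rcases List.mem_map.mp hmmem with ⟨q, hql, hq2⟩
        have h1 : m ≤ p.2 :=
          hmin p.2 (List.mem_map.mpr ⟨p, hperm.mem_iff.mp List.mem_cons_self, rfl⟩)
        have h2 : p.2 ≤ m := hq2 ▸ hple q (hperm.mem_iff.mpr hql)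
        omega
      have hge : ∀ q ∈ p :: rest, m ≤ q.2 := by
        intro q hq
        exact hmin q.2 (List.mem_map.mpr ⟨q, hperm.mem_iff.mp hq, rfl⟩)
      have htw : (p :: rest).takeWhile (fun q : Int × Int => q.2 == m)
          = (p :: rest).filter (fun q : Int × Int => q.2 == m) :=
        takeWhile_eq_filter_min m (p :: rest) hpair hge
      have hfperm : ((p :: rest).filter (fun q : Int × Int => q.2 == m)).Perm
          (l.filter (fun q : Int × Int => q.2 == m)) := hperm.filter _
      have hne : p ∈ (p :: rest).filter (fun q : Int × Int => q.2 == m) := by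
        apply List.mem_filter.mpr
        exact ⟨List.mem_cons_self, by simp [hpm]⟩
      simp only [hpm, htw]
      by_cases hlen : 1 < ((p :: rest).filter (fun q : Int × Int => q.2 == m)).length
      · have hlen' : 1 < (l.filter (fun q : Int × Int => q.2 == m)).length :=
          hfperm.length_eq ▸ hlen
        simp [hlen, hlen']
      · have h1 : ((p :: rest).filter (fun q : Int × Int => q.2 == m)).length = 1 := by
          have : 0 < ((p :: rest).filter (fun q : Int × Int => q.2 == m)).length :=
            List.length_pos_of_mem hne
          omega
        rcases List.length_eq_one_iff.mp h1 with ⟨a, ha⟩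
        have hfl : l.filter (fun q : Int × Int => q.2 == m) = [a] :=
          List.perm_singleton.mp (ha ▸ hfperm).symm |>.symm ▸ rfl
        have hlen' : ¬ 1 < (l.filter (fun q : Int × Int => q.2 == m)).length := by
          rw [hfl]; simp
        simp [hlen, hlen', ha, hfl]

-- ===== VERDICT (by name: the statement is the Claim_ definition above) =====
theorem find_least_common_spec : Claim_equal_find_least_common := by
  intro bit_list _ hpre
  unfold Spec_find_least_common find_least_common find_least_common_alt
  have hitems : (PySem.Dict.counter bit_list).items ≠ [] := by
    cases bit_list with
    | nil => exact absurd rfl hpre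
    | cons x t =>
      simp [PySem.Dict.items_counter]
      intro h
      have : x ∈ PySem.Set.ofList (x :: t) := (PySem.Set.mem_ofList _ _).mpr List.mem_cons_self
      rw [h] at this; exact absurd this (List.not_mem_nil)
  have hvals : (PySem.Dict.counter bit_list).values
      = (PySem.Dict.counter bit_list).items.map (fun p : Int × Int => p.2) := rfl
  have := core_eq (PySem.Dict.counter bit_list).items hitems
  simp only [hvals]
  exact this
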